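-- pv_equiv track=rewrite | github.com/BenjaminNT12/Algoritmos_vision | algoritmos/python_class3.py | saltar_numeros
-- ===== SOURCE A (Python) =====
-- def saltar_numeros(iteraciones, numeros_a_saltar):
--     contador = 0
--     numero_actual = 0
--
--     while contador < iteraciones:
--         numero_actual += 1
--
--         if numero_actual in numeros_a_saltar:
--             continue
--
--         contador += 1
--     return numero_actual
-- ===== SOURCE B (Python) =====
-- def saltar_numeros(iteraciones, numeros_a_saltar):
--     t = iteraciones if iteraciones > 0 else 0
--     for s in sorted({x for x in numeros_a_saltar if x >= 1}):
--         if s <= t: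
--             t += 1
--     return t
-- ===== Notes on version B (the rewrite author's own statement) =====
-- stated objective: faster
-- what changed: Instead of counting up one integer at a time and testing membership in the skip list, B sorts the distinct positive skip values once and shifts the target up by one for each skip value it passes, computing the answer in O(k log k) independent of iteraciones.
import Mathlib
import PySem

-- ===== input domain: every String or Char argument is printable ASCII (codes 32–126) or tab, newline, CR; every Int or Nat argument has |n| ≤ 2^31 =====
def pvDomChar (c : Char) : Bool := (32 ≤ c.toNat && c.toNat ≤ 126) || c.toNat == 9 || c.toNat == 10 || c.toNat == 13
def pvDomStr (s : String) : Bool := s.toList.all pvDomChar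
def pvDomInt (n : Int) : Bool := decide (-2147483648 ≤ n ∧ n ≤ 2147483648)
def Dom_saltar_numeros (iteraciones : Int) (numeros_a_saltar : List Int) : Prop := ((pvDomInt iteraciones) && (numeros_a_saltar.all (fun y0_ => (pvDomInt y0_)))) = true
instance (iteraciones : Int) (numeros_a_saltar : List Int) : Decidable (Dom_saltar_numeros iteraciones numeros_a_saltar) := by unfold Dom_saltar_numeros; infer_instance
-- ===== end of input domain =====

-- B replaces A's count-up-by-one scan with sorting the distinct positive skip values
-- and shifting the target once per skip it passes (objective: faster, asymptotic).

-- ===== PORT A =====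
-- termination helper for A's while-loop: the filter of values above the cursor shrinks strictly
theorem pv_filter_mono (p q : Int → Bool) (h : ∀ x, p x = true → q x = true) :
    ∀ (L : List Int), (L.filter p).length ≤ (L.filter q).length := by
  intro L
  induction L with
  | nil => simp
  | cons a t ih =>
    by_cases hp : p a = true
    · simp [List.filter_cons, hp, h a hp]; omega
    · simp only [List.filter_cons, hp]
      by_cases hq : q a = true <;> simp [hq] <;> omega

theorem pv_filter_dec (L : List Int) (n : Int) (h : (n + 1) ∈ L) :
    (L.filter (fun s => decide (n + 1 < s))).length < (L.filter (fun s => decide (n < s))).length := by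
  induction L with
  | nil => simp at h
  | cons a t ih =>
    rcases List.mem_cons.mp h with ha | ht
    · subst ha
      have hle := pv_filter_mono (fun s => decide (n + 1 < s)) (fun s => decide (n < s))
        (by intro x hx; simp at hx ⊢; omega) t
      simp [List.filter_cons]
      omega
    · have := ih ht
      simp only [List.filter_cons]
      by_cases h1 : n + 1 < a
      · have h2 : n < a := by omega
        simp [h1, h2]; omega
      · by_cases h2 : n < a <;> simp [h1, h2] <;> omega

-- A's while-loop, state (contador, numero_actual)
def pvLoopA (it : Int) (L : List Int) (c n : Int) : Int :=
  if c < it then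
    if (n + 1) ∈ L then
      pvLoopA it L c (n + 1)
    else
      pvLoopA it L (c + 1) (n + 1)
  else n
termination_by ((it - c).toNat, (L.filter (fun s => decide (n < s))).length)
decreasing_by
  · exact Prod.Lex.right _ (pv_filter_dec L n (by assumption))
  · exact Prod.Lex.left _ _ (by omega)

def saltar_numeros (iteraciones : Int) (numeros_a_saltar : List Int) : Int :=
  pvLoopA iteraciones numeros_a_saltar 0 0

-- ===== PORT B =====
def saltar_numeros_alt (iteraciones : Int) (numeros_a_saltar : List Int) : Int :=
  let t0 := if iteraciones > 0 then iteraciones else 0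
  (PySem.List.sorted (PySem.Set.ofList (numeros_a_saltar.filter (fun x => decide (1 ≤ x))))
      (fun x => x) false).foldl (fun t s => if s ≤ t then t + 1 else t) t0

-- ===== PRECONDITION & SPEC =====
def Spec_saltar_numeros (iteraciones : Int) (numeros_a_saltar : List Int) (out : Int) : Prop := out = saltar_numeros_alt iteraciones numeros_a_saltar
instance (iteraciones : Int) (numeros_a_saltar : List Int) (out : Int) : Decidable (Spec_saltar_numeros iteraciones numeros_a_saltar out) := by unfold Spec_saltar_numeros; infer_instance

-- ===== CLAIM (what is proved, stated in full; the proofs are below) =====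
def Claim_equal_saltar_numeros : Prop := ∀ (iteraciones : Int) (numeros_a_saltar : List Int), Dom_saltar_numeros iteraciones numeros_a_saltar → Spec_saltar_numeros iteraciones numeros_a_saltar (saltar_numeros iteraciones numeros_a_saltar)

-- ===== LEMMAS AND PROOFS =====

-- number of NON-skipped integers in [1, k]
def pvNS (L : List Int) : Nat → Nat
  | 0 => 0
  | k + 1 => pvNS L k + (if ((k : Int) + 1) ∈ L then 0 else 1)

theorem pvNS_mono (L : List Int) : ∀ {j k : Nat}, j ≤ k → pvNS L j ≤ pvNS L k := by
  intro j k h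
  induction k with
  | zero => simp_all [pvNS]
  | succ k ih =>
    rcases Nat.lt_or_ge j (k + 1) with h1 | h1
    · have := ih (by omega)
      simp [pvNS]; omega
    · have : j = k + 1 := by omega
      subst this; rfl

-- A's loop returns r, given the invariant linking contador to the non-skipped count
theorem pvLoopA_eq (it : Int) (L : List Int) (r : Int) (hr : 0 < r) (hrL : r ∉ L) :
    ∀ (k : Nat) (n c : Int), (r - n).toNat = k → 0 ≤ n → n ≤ r →
      c = it - ((pvNS L r.toNat : Int) - (pvNS L n.toNat : Int)) → pvLoopA it L c n = r := by
  intro k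
  induction k with
  | zero =>
    intro n c hk h0 hnr hc
    have hnr' : n = r := by omega
    subst hnr'
    rw [pvLoopA]
    have : ¬ c < it := by omega
    simp [this]
  | succ k ih =>
    intro n c hk h0 hnr hc
    have hlt : n < r := by omega
    -- pvNS strictly grows from n to r, since r itself is not skipped
    have hstep : pvNS L r.toNat = pvNS L (r.toNat - 1) + 1 := by
      have h1 : r.toNat = (r.toNat - 1) + 1 := by omega
      have h2 : ((r.toNat - 1 : Nat) : Int) + 1 = r := by omega
      calc pvNS L r.toNat = pvNS L ((r.toNat - 1) + 1) := by rw [← h1]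
        _ = pvNS L (r.toNat - 1) + (if (((r.toNat - 1 : Nat) : Int) + 1) ∈ L then 0 else 1) := rfl
        _ = pvNS L (r.toNat - 1) + 1 := by rw [h2]; simp [hrL]
    have hmono : pvNS L n.toNat ≤ pvNS L (r.toNat - 1) := pvNS_mono L (by omega)
    have hcit : c < it := by omega
    rw [pvLoopA]
    have hnat : (n + 1).toNat = n.toNat + 1 := by omega
    have hcast : ((n.toNat : Int) + 1) = n + 1 := by omega
    have hNSsucc : pvNS L (n + 1).toNat = pvNS L n.toNat + (if (n + 1) ∈ L then 0 else 1) := by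
      rw [hnat]
      show pvNS L n.toNat + (if ((n.toNat : Int) + 1) ∈ L then 0 else 1) = _
      rw [hcast]
    by_cases hmem : (n + 1) ∈ L
    · simp only [hcit, if_true, hmem, if_true]
      exact ih (n + 1) c (by omega) (by omega) (by omega)
        (by rw [hNSsucc]; simp [hmem]; omega)
    · simp only [hcit, if_true, hmem, if_false]
      exact ih (n + 1) (c + 1) (by omega) (by omega) (by omega)
        (by rw [hNSsucc]; simp [hmem]; omega)

-- B's fold leaves t unchanged when every remaining skip is above it
theorem pvFold_const (t : Int) : ∀ (l : List Int), (∀ x ∈ l, t < x) →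
    l.foldl (fun t s => if s ≤ t then t + 1 else t) t = t := by
  intro l
  induction l with
  | nil => intro _; rfl
  | cons a rest ih =>
    intro h
    have ha : t < a := h a (by simp)
    have : ¬ a ≤ t := by omega
    simp only [List.foldl_cons, this, if_false]
    exact ih (fun x hx => h x (by simp [hx]))

-- characterisation of B's fold on a strictly sorted skip list
theorem pvFold_spec : ∀ (l : List Int), l.Pairwise (· < ·) → ∀ (t : Int),
    t ≤ l.foldl (fun t s => if s ≤ t then t + 1 else t) t ∧
    l.foldl (fun t s => if s ≤ t then t + 1 else t) t ∉ l ∧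
    l.foldl (fun t s => if s ≤ t then t + 1 else t) t
      = t + ((l.filter (fun s => decide (s ≤ l.foldl (fun t s => if s ≤ t then t + 1 else t) t))).length : Int) := by
  intro l
  induction l with
  | nil => intro _ t; simp
  | cons a rest ih =>
    intro hp t
    have hpr : rest.Pairwise (· < ·) := (List.pairwise_cons.mp hp).2
    have har : ∀ x ∈ rest, a < x := (List.pairwise_cons.mp hp).1
    by_cases hat : a ≤ t
    · simp only [List.foldl_cons, hat, if_true]
      obtain ⟨h1, h2, h3⟩ := ih hpr (t + 1)
      set r := rest.foldl (fun t s => if s ≤ t then t + 1 else t) (t + 1) with hr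
      have har' : a < r := by omega
      refine ⟨by omega, ?_, ?_⟩
      · simp only [List.mem_cons, not_or]
        exact ⟨by omega, h2⟩
      · have : decide (a ≤ r) = true := by simp; omega
        simp only [List.filter_cons, this, if_true, List.length_cons]
        push_cast
        omega
    · have ht : t < a := by omega
      simp only [List.foldl_cons, hat, if_false]
      have hconst := pvFold_const t rest (fun x hx => lt_trans ht (har x hx))
      rw [hconst]
      refine ⟨le_refl t, ?_, ?_⟩
      · simp only [List.mem_cons, not_or]
        exact ⟨by omega, fun hx => absurd (har t hx) (by omega)⟩
      · have hfa : decide (a ≤ t) = false := by simp; omega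
        have hfr : rest.filter (fun s => decide (s ≤ t)) = [] := by
          rw [List.filter_eq_nil_iff]
          intro x hx
          have := har x hx
          simp; omega
        simp [List.filter_cons, hfa, hfr]
      
-- splitting a ≤-filter of a nodup list at its upper endpoint
theorem pv_filter_succ : ∀ (l : List Int), l.Nodup → ∀ (v : Int),
    (l.filter (fun s => decide (s ≤ v))).length
      = (l.filter (fun s => decide (s ≤ v - 1))).length + (if v ∈ l then 1 else 0) := by
  intro l
  induction l with
  | nil => simp
  | cons a t ih =>
    intro hnd v
    obtain ⟨hat, hndt⟩ := List.nodup_cons.mp hnd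
    by_cases hav : a = v
    · subst hav
      have h2 : ¬ (a ≤ a - 1) := by omega
      have heq : List.filter (fun s => decide (s ≤ a)) t = List.filter (fun s => decide (s ≤ a - 1)) t :=
        List.filter_congr (fun x hx => by
          have hxa : x ≠ a := fun h => hat (h ▸ hx)
          simp; omega)
      simp [List.filter_cons, h2, heq, hat]
    · have hmm : (v ∈ a :: t) ↔ (v ∈ t) := by
        constructor
        · intro h
          rcases List.mem_cons.mp h with h | h
          · exact absurd h.symm hav
          · exact h
        · exact fun h => List.mem_cons_of_mem _ h
      have ih' := ih hndt v
      have hsub : List.filter (fun s => decide (s ≤ v - 1)) t = List.filter (fun s => decide (s < v)) t :=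
        List.filter_congr (fun x _ => by simp)
      rw [hsub] at ih'
      by_cases h1 : a < v
      · have h3 : a ≤ v := by omega
        simp [List.filter_cons, h1, h3, hmm, ih']
        omega
      · have h3 : ¬ a ≤ v := by omega
        simp [List.filter_cons, h1, h3, hmm, ih']

-- link: the skips ≤ k among the distinct positives plus the non-skipped in [1,k] make up [1,k]
theorem pv_count_link (L : List Int) (l : List Int) (hnd : l.Nodup)
    (hmem : ∀ x : Int, x ∈ l ↔ (x ∈ L ∧ 1 ≤ x)) :
    ∀ k : Nat, (l.filter (fun s => decide (s ≤ (k : Int)))).length + pvNS L k = k := by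
  intro k
  induction k with
  | zero =>
    have : l.filter (fun s => decide (s ≤ (0 : Int))) = [] := by
      rw [List.filter_eq_nil_iff]
      intro x hx
      have := (hmem x).mp hx
      simp; omega
    simp [this, pvNS]
  | succ k ih =>
    have hv := pv_filter_succ l hnd ((k : Int) + 1)
    have hc : ((k : Int) + 1 - 1) = (k : Int) := by ring
    rw [hc] at hv
    have hml : (((k : Int) + 1) ∈ l) ↔ (((k : Int) + 1) ∈ L) := by
      rw [hmem]; constructor
      · exact fun h => h.1
      · exact fun h => ⟨h, by omega⟩
    have hcast : ((k + 1 : Nat) : Int) = (k : Int) + 1 := by push_cast; ring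
    show (l.filter (fun s => decide (s ≤ ((k + 1 : Nat) : Int)))).length
        + (pvNS L k + (if ((k : Int) + 1) ∈ L then 0 else 1)) = k + 1
    rw [hcast, hv]
    by_cases hL : ((k : Int) + 1) ∈ L
    · simp only [hL, if_true, hml.mpr hL, if_true]
      omega
    · have : ¬ ((k : Int) + 1) ∈ l := fun h => hL (hml.mp h)
      simp only [hL, this, if_false]
      omega

-- ===== VERDICT (by name: the statement is the Claim_ definition above) =====
theorem saltar_numeros_spec : Claim_equal_saltar_numeros := by
  intro it L _
  unfold Spec_saltar_numeros saltar_numeros saltar_numeros_alt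
  set l := PySem.List.sorted (PySem.Set.ofList (L.filter (fun x => decide (1 ≤ x)))) (fun x => x) false with hl
  have hpl : l.Pairwise (· < ·) := by
    rw [hl]; exact PySem.List.sorted_ofList_pairwise_lt _
  have hnd : l.Nodup := hpl.imp ne_of_lt
  have hmem : ∀ x : Int, x ∈ l ↔ (x ∈ L ∧ 1 ≤ x) := by
    intro x
    rw [hl, PySem.List.mem_sorted, PySem.Set.mem_ofList, List.mem_filter]
    simp
  by_cases hit : 0 < it
  · simp only [hit, if_true]
    obtain ⟨h1, h2, h3⟩ := pvFold_spec l hpl it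
    set r := l.foldl (fun t s => if s ≤ t then t + 1 else t) it with hrdef
    have hr0 : 0 < r := by omega
    have hrL : r ∉ L := by
      intro hmemL
      exact h2 ((hmem r).mpr ⟨hmemL, by omega⟩)
    have hlink := pv_count_link L l hnd hmem r.toNat
    have hcast : ((r.toNat : Nat) : Int) = r := by omega
    rw [hcast] at hlink
    have hNS : (pvNS L r.toNat : Int) = it := by omega
    apply pvLoopA_eq it L r hr0 hrL r.toNat 0 0 (by omega) (le_refl 0) (by omega)
    simp [pvNS, hNS]
  · simp only [hit, if_false]
    have hB : l.foldl (fun t s => if s ≤ t then t + 1 else t) 0 = 0 := by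
      apply pvFold_const
      intro x hx
      have := ((hmem x).mp hx).2
      omega
    rw [hB, pvLoopA]
    simp [hit]
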